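-- pv_equiv track=rewrite | github.com/TomteTumetott/RNA_prac_course_2025 | scripts/three_feature_extraction.py | extract_structural_features
-- ===== SOURCE A (Python) =====
-- def extract_structural_features(dot_bracket_structure):
--     #Extrahiert Features aus Dot-Bracket-Notation:
--     #- creates short form on the base of symbol changes
--     #- zählt die Anzahl an Stems ('(')
--     #- gibt Positionen der Wechsel zurück
--
--     if not dot_bracket_structure or not isinstance(dot_bracket_structure, str):
--         return "", 0, []
--
--     structure = dot_bracket_structure.strip()
--     if not structure:
--         return "", 0, []
--
--     feature_string = ""
--     feature_positions = []
--     current_symbol = structure[0]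
--     feature_number = 1
--     stem_count = 0
--
--     # Initialsymbol
--     feature_string += current_symbol
--     if current_symbol == '(':
--         stem_count += 1
--     feature_positions.append((0, current_symbol, feature_number))
--
--     for i in range(1, len(structure)):
--         symbol = structure[i]
--         if symbol != current_symbol:
--             feature_number += 1
--             current_symbol = symbol
--             feature_string += symbol
--             feature_positions.append((i, symbol, feature_number))
--             if symbol == '(':
--                 stem_count += 1
--
--     return feature_string, stem_count, feature_positions
-- ===== SOURCE B (Python) =====
-- def extract_structural_features(dot_bracket_structure):
--     # Two-pass re-implementation: first run-length-encode the stripped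
--     # structure, then derive all three features from the run list using a
--     # cumulative offset (instead of A's single indexed change-detection loop).
--     if not dot_bracket_structure or not isinstance(dot_bracket_structure, str):
--         return "", 0, []
--
--     structure = dot_bracket_structure.strip()
--     if not structure:
--         return "", 0, []
--
--     runs = []
--     run_symbol, run_len = structure[0], 1
--     for symbol in structure[1:]:
--         if symbol == run_symbol:
--             run_len += 1
--         else:
--             runs.append((run_symbol, run_len))
--             run_symbol, run_len = symbol, 1
--     runs.append((run_symbol, run_len))
--
--     feature_string = ""
--     feature_positions = []
--     stem_count = 0
--     offset = 0
--     for group_number, (symbol, length) in enumerate(runs, start=1):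
--         feature_string += symbol
--         feature_positions.append((offset, symbol, group_number))
--         if symbol == '(':
--             stem_count += 1
--         offset += length
--
--     return feature_string, stem_count, feature_positions
-- ===== Notes on version B (the rewrite author's own statement) =====
-- stated objective: alternative
-- what changed: Replaces A's single indexed change-detection loop by a two-pass pipeline: run-length-encode the stripped string, then build feature string, stem count and positions from the run list via a cumulative offset instead of loop indices.
import Mathlib
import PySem

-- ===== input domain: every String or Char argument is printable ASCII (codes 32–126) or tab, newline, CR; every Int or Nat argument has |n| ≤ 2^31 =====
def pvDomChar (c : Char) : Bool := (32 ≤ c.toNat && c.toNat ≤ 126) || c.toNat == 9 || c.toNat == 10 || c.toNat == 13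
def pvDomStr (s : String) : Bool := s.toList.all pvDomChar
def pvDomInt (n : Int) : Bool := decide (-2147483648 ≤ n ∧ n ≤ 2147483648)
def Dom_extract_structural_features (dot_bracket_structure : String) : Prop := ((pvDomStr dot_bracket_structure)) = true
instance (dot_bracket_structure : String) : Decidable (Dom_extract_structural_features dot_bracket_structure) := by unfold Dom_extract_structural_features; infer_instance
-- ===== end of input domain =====

-- B replaces A's single indexed change-detection loop by run-length encoding followed by a
-- fold over the runs with a cumulative offset (objective: alternative decomposition).

-- ===== PORT A =====
-- local variables structure/chars/current_symbol/st of A are inlined (Lean `let`s block rewriting);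
-- each occurrence below is the same expression A binds to them
def extract_structural_features (dot_bracket_structure : String) : String × Int × (List (Int × String × Int)) :=
  if dot_bracket_structure = "" then ("", 0, []) else
  if PySem.Str.strip dot_bracket_structure = "" then ("", 0, []) else
  -- state: (current_symbol, feature_number, stem_count, feature_string, feature_positions)
  (fun (st : Char × Int × Int × String × List (Int × String × Int)) =>
      (st.2.2.2.1, st.2.2.1, st.2.2.2.2))
    ((PySem.List.pyRange 1 ((PySem.Str.strip dot_bracket_structure).toList.length : Int) 1).foldl
      (fun (st : Char × Int × Int × String × List (Int × String × Int)) (i : Int) =>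
        if PySem.List.pyGetD (PySem.Str.strip dot_bracket_structure).toList i ' ' ≠ st.1 then
          (PySem.List.pyGetD (PySem.Str.strip dot_bracket_structure).toList i ' ', st.2.1 + 1,
           (if PySem.List.pyGetD (PySem.Str.strip dot_bracket_structure).toList i ' ' = '(' then st.2.2.1 + 1 else st.2.2.1),
           st.2.2.2.1.push (PySem.List.pyGetD (PySem.Str.strip dot_bracket_structure).toList i ' '),
           st.2.2.2.2 ++ [(i, String.ofList [PySem.List.pyGetD (PySem.Str.strip dot_bracket_structure).toList i ' '], st.2.1 + 1)])
        else st)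
      (PySem.List.pyGetD (PySem.Str.strip dot_bracket_structure).toList 0 ' ', 1,
       (if PySem.List.pyGetD (PySem.Str.strip dot_bracket_structure).toList 0 ' ' = '(' then 1 else 0),
       ("" : String).push (PySem.List.pyGetD (PySem.Str.strip dot_bracket_structure).toList 0 ' '),
       [((0 : Int), String.ofList [PySem.List.pyGetD (PySem.Str.strip dot_bracket_structure).toList 0 ' '], (1 : Int))]))

-- ===== PORT B =====
-- first pass of Source B: run-length encode (pvRunsAux carries the open run (run_symbol, run_len))
def pvRunsAux (c : Char) (n : Nat) : List Char → List (Char × Nat)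
  | [] => [(c, n)]
  | x :: xs => if x = c then pvRunsAux c (n + 1) xs else (c, n) :: pvRunsAux x 1 xs

-- Source B's structure[0] / structure[1:] appear as the match on the stripped string's characters;
-- the second loop of Source B is the foldl over the run list
def extract_structural_features_alt (dot_bracket_structure : String) : String × Int × (List (Int × String × Int)) :=
  if dot_bracket_structure = "" then ("", 0, []) else
  if PySem.Str.strip dot_bracket_structure = "" then ("", 0, []) else
  match (PySem.Str.strip dot_bracket_structure).toList with
  | [] => ("", 0, [])
  | c :: rest =>
    -- state: (offset, group_number, feature_string, feature_positions, stem_count)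
    (fun (st : Int × Int × String × List (Int × String × Int) × Int) =>
        (st.2.2.1, st.2.2.2.2, st.2.2.2.1))
      ((pvRunsAux c 1 rest).foldl
        (fun (st : Int × Int × String × List (Int × String × Int) × Int) (r : Char × Nat) =>
          (st.1 + (r.2 : Int), st.2.1 + 1, st.2.2.1.push r.1,
           st.2.2.2.1 ++ [(st.1, String.ofList [r.1], st.2.1)],
           (if r.1 = '(' then st.2.2.2.2 + 1 else st.2.2.2.2)))
        ((0 : Int), 1, "", [], 0))

-- ===== PRECONDITION & SPEC =====
def Spec_extract_structural_features (dot_bracket_structure : String) (out : String × Int × (List (Int × String × Int))) : Prop := out = extract_structural_features_alt dot_bracket_structure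
instance (dot_bracket_structure : String) (out : String × Int × (List (Int × String × Int))) : Decidable (Spec_extract_structural_features dot_bracket_structure out) := by unfold Spec_extract_structural_features; infer_instance

-- ===== CLAIM (what is proved, stated in full; the proofs are below) =====
def Claim_equal_extract_structural_features : Prop := ∀ (dot_bracket_structure : String), Dom_extract_structural_features dot_bracket_structure → Spec_extract_structural_features dot_bracket_structure (extract_structural_features dot_bracket_structure)

-- ===== LEMMAS AND PROOFS =====

-- A's loop over enumerate(rest, i) from a state that already holds the entry for the open run
-- (c, n) equals B's fold over pvRunsAux c n rest from the corresponding pre-run state.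
lemma pv_bridge (rest : List Char) :
    ∀ (c : Char) (i : Int) (n : Nat) (num stems : Int) (fs : String)
      (pos : List (Int × String × Int)),
    (fun (st : Char × Int × Int × String × List (Int × String × Int)) =>
        (st.2.2.2.1, st.2.2.1, st.2.2.2.2))
      ((PySem.List.enumerate rest i).foldl
        (fun (st : Char × Int × Int × String × List (Int × String × Int)) (p : Int × Char) =>
          if p.2 ≠ st.1 then
            (p.2, st.2.1 + 1, (if p.2 = '(' then st.2.2.1 + 1 else st.2.2.1),
             st.2.2.2.1.push p.2, st.2.2.2.2 ++ [(p.1, String.ofList [p.2], st.2.1 + 1)])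
          else st)
        (c, num, (if c = '(' then stems + 1 else stems), fs.push c,
         pos ++ [(i - (n : Int), String.ofList [c], num)]))
    = (fun (st : Int × Int × String × List (Int × String × Int) × Int) =>
        (st.2.2.1, st.2.2.2.2, st.2.2.2.1))
      ((pvRunsAux c n rest).foldl
        (fun (st : Int × Int × String × List (Int × String × Int) × Int) (r : Char × Nat) =>
          (st.1 + (r.2 : Int), st.2.1 + 1, st.2.2.1.push r.1,
           st.2.2.2.1 ++ [(st.1, String.ofList [r.1], st.2.1)],
           (if r.1 = '(' then st.2.2.2.2 + 1 else st.2.2.2.2)))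
        (i - (n : Int), num, fs, pos, stems)) := by
  induction rest with
  | nil =>
    intro c i n num stems fs pos
    simp [pvRunsAux, PySem.List.enumerate]
  | cons x xs ih =>
    intro c i n num stems fs pos
    by_cases hx : x = c
    · subst hx
      have h := ih x (i + 1) (n + 1) num stems fs pos
      simp [pvRunsAux, PySem.List.enumerate_cons] at h ⊢
      convert h using 3
    · have h := ih x (i + 1) 1 (num + 1) (if c = '(' then stems + 1 else stems)
        (fs.push c) (pos ++ [(i - (n : Int), String.ofList [c], num)])
      simp [pvRunsAux, hx, PySem.List.enumerate_cons] at h ⊢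
      exact h

-- pv_bridge instantiated at the initial state both ports build from the first character.
lemma pv_bridge0 (c : Char) (rest : List Char) :
    (fun (st : Char × Int × Int × String × List (Int × String × Int)) =>
        (st.2.2.2.1, st.2.2.1, st.2.2.2.2))
      ((PySem.List.enumerate rest 1).foldl
        (fun (st : Char × Int × Int × String × List (Int × String × Int)) (p : Int × Char) =>
          if p.2 ≠ st.1 then
            (p.2, st.2.1 + 1, (if p.2 = '(' then st.2.2.1 + 1 else st.2.2.1),
             st.2.2.2.1.push p.2, st.2.2.2.2 ++ [(p.1, String.ofList [p.2], st.2.1 + 1)])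
          else st)
        (c, 1, (if c = '(' then 1 else 0), ("" : String).push c,
         [((0 : Int), String.ofList [c], (1 : Int))]))
    = (fun (st : Int × Int × String × List (Int × String × Int) × Int) =>
        (st.2.2.1, st.2.2.2.2, st.2.2.2.1))
      ((pvRunsAux c 1 rest).foldl
        (fun (st : Int × Int × String × List (Int × String × Int) × Int) (r : Char × Nat) =>
          (st.1 + (r.2 : Int), st.2.1 + 1, st.2.2.1.push r.1,
           st.2.2.2.1 ++ [(st.1, String.ofList [r.1], st.2.1)],
           (if r.1 = '(' then st.2.2.2.2 + 1 else st.2.2.2.2)))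
        ((0 : Int), 1, "", [], 0)) := by
  have h := pv_bridge rest c 1 1 1 0 "" []
  norm_num at h ⊢
  exact h

-- the common body of both ports after the two guards, written without lets so it can be rewritten
lemma pv_core (t : String) :
    (if t = "" then (("" : String), (0 : Int), ([] : List (Int × String × Int))) else
      (fun (st : Char × Int × Int × String × List (Int × String × Int)) =>
          (st.2.2.2.1, st.2.2.1, st.2.2.2.2))
        ((PySem.List.pyRange 1 (t.toList.length : Int) 1).foldl
          (fun (st : Char × Int × Int × String × List (Int × String × Int)) (i : Int) =>
            if PySem.List.pyGetD t.toList i ' ' ≠ st.1 then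
              (PySem.List.pyGetD t.toList i ' ', st.2.1 + 1,
               (if PySem.List.pyGetD t.toList i ' ' = '(' then st.2.2.1 + 1 else st.2.2.1),
               st.2.2.2.1.push (PySem.List.pyGetD t.toList i ' '),
               st.2.2.2.2 ++ [(i, String.ofList [PySem.List.pyGetD t.toList i ' '], st.2.1 + 1)])
            else st)
          (PySem.List.pyGetD t.toList 0 ' ', 1,
           (if PySem.List.pyGetD t.toList 0 ' ' = '(' then 1 else 0),
           ("" : String).push (PySem.List.pyGetD t.toList 0 ' '),
           [((0 : Int), String.ofList [PySem.List.pyGetD t.toList 0 ' '], (1 : Int))])))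
    = (if t = "" then (("" : String), (0 : Int), ([] : List (Int × String × Int))) else
        match t.toList with
        | [] => (("" : String), (0 : Int), ([] : List (Int × String × Int)))
        | c :: rest =>
          (fun (st : Int × Int × String × List (Int × String × Int) × Int) =>
              (st.2.2.1, st.2.2.2.2, st.2.2.2.1))
            ((pvRunsAux c 1 rest).foldl
              (fun (st : Int × Int × String × List (Int × String × Int) × Int) (r : Char × Nat) =>
                (st.1 + (r.2 : Int), st.2.1 + 1, st.2.2.1.push r.1,
                 st.2.2.2.1 ++ [(st.1, String.ofList [r.1], st.2.1)],
                 (if r.1 = '(' then st.2.2.2.2 + 1 else st.2.2.2.2)))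
              ((0 : Int), 1, "", [], 0))) := by
  by_cases h1 : t = ""
  · rw [h1]; rfl
  · rw [if_neg h1, if_neg h1]
    obtain ⟨c, rest, hc⟩ : ∃ c rest, t.toList = c :: rest := by
      cases hl : t.toList with
      | nil => exact absurd (by simpa using congrArg String.ofList hl) h1
      | cons c rest => exact ⟨c, rest, rfl⟩
    rw [hc, PySem.List.pyGetD_zero_cons]
    have hmap : PySem.List.enumerate rest 1
        = (PySem.List.pyRange 1 ((c :: rest).length : Int) 1).map
            (fun j => (j, PySem.List.pyGetD (c :: rest) j ' ')) := by
      have h := PySem.List.enumerate_eq_map_pyRange (c :: rest) ' '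
      have hlen : (0 : Int) < PySem.List.len (c :: rest) := by
        simp [PySem.List.len]
      rw [PySem.List.pyRange_one_cons hlen, List.map_cons,
          PySem.List.enumerate_cons] at h
      have := (List.cons.injEq _ _ _ _).mp h
      simpa [PySem.List.len] using this.2
    have hfold := pv_bridge0 c rest
    rw [hmap, List.foldl_map] at hfold
    exact hfold

-- ===== VERDICT (by name: the statement is the Claim_ definition above) =====
theorem extract_structural_features_spec : Claim_equal_extract_structural_features := by
  intro s _
  unfold Spec_extract_structural_features extract_structural_features extract_structural_features_alt
  by_cases h0 : s = ""
  · subst h0; rfl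
  · rw [if_neg h0, if_neg h0]
    exact pv_core (PySem.Str.strip s)
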